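-- pv_equiv track=rewrite | github.com/alexou8/CP104 | ouxx5748_l08/src/functions.py | list_categorize
-- ===== SOURCE A (Python) =====
-- def list_categorize(values):
--     """
--     -------------------------------------------------------
--     Returns data about the categories of values in a list.
--     Use: negatives, positives, zeroes, evens, odds = list_categorize(values)
--     -------------------------------------------------------
--     Parameters:
--         values - a list of values (list of int)
--     Returns:
--         negatives - the number of negative values (int)
--         positives - the number of positive values (int)
--         zeroes - the number of zeroes (int)
--         evens - the number of even values (int)
--         odds - the number of odd values (int)
--     -------------------------------------------------------
--     """
--     negatives = 0
--     positives = 0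
--     zeroes = 0
--     evens = 0
--     odds = 0
--
--     for num in values:
--         if num > 0:
--             positives += 1
--         if num < 0:
--             negatives += 1
--         if num == 0:
--             zeroes += 1
--         if num % 2 == 0:
--             evens += 1
--         if num % 2 != 0:
--             odds += 1
--
--     return(negatives, positives, zeroes, evens, odds)
-- ===== SOURCE B (Python) =====
-- def list_categorize(values):
--     return (
--         sum(1 for x in values if x < 0),
--         sum(1 for x in values if x > 0),
--         values.count(0),
--         sum(1 for x in values if x % 2 == 0),
--         sum(1 for x in values if x % 2 != 0),
--     )
-- ===== Notes on version B (the rewrite author's own statement) =====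
-- stated objective: idiomatic
-- what changed: B replaces A's single loop over five mutable counters with five independent staged passes (generator-sum per predicate and list.count for zeroes), no shared loop state at all.
import Mathlib
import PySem

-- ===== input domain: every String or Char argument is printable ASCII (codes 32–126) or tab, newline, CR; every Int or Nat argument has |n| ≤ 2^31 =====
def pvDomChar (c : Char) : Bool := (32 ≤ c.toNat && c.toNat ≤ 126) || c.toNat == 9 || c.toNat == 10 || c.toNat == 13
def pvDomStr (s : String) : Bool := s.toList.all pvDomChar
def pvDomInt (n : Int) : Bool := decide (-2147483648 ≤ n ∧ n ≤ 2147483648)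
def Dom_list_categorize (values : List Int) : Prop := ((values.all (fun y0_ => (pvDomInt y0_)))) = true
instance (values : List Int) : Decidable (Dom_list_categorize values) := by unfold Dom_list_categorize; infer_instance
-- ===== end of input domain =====

-- B replaces A's single loop over five mutable counters with five independent staged passes
-- (one count per category, list.count for zeroes); objective: idiomatic.

-- ===== PORT A =====
-- loop body of A: five independent if-statements updating five counters
def stepA (st : Int × Int × Int × Int × Int) (num : Int) : Int × Int × Int × Int × Int :=
  let (negatives, positives, zeroes, evens, odds) := st
  let positives := if num > 0 then positives + 1 else positives
  let negatives := if num < 0 then negatives + 1 else negatives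
  let zeroes := if num = 0 then zeroes + 1 else zeroes
  let evens := if PySem.Int.mod num 2 = 0 then evens + 1 else evens
  let odds := if PySem.Int.mod num 2 ≠ 0 then odds + 1 else odds
  (negatives, positives, zeroes, evens, odds)

def list_categorize (values : List Int) : Int × Int × Int × Int × Int :=
  values.foldl stepA (0, 0, 0, 0, 0)

-- ===== PORT B =====
-- five staged passes, one per category (values.count 0 ports Python's values.count(0))
def list_categorize_alt (values : List Int) : Int × Int × Int × Int × Int :=
  ((values.countP (fun x => decide (x < 0)) : Int),
   (values.countP (fun x => decide (x > 0)) : Int),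
   (values.count 0 : Int),
   (values.countP (fun x => decide (PySem.Int.mod x 2 = 0)) : Int),
   (values.countP (fun x => decide (PySem.Int.mod x 2 ≠ 0)) : Int))

-- ===== PRECONDITION & SPEC =====
def Spec_list_categorize (values : List Int) (out : Int × Int × Int × Int × Int) : Prop := out = list_categorize_alt values
instance (values : List Int) (out : Int × Int × Int × Int × Int) : Decidable (Spec_list_categorize values out) := by unfold Spec_list_categorize; infer_instance

-- ===== CLAIM (what is proved, stated in full; the proofs are below) =====
def Claim_equal_list_categorize : Prop := ∀ (values : List Int), Dom_list_categorize values → Spec_list_categorize values (list_categorize values)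

-- ===== LEMMAS AND PROOFS =====
lemma loop_counts : ∀ (vs : List Int) (n p z e o : Int),
    vs.foldl stepA (n, p, z, e, o) =
      (n + (vs.countP (fun x => decide (x < 0)) : Int),
       p + (vs.countP (fun x => decide (x > 0)) : Int),
       z + (vs.count 0 : Int),
       e + (vs.countP (fun x => decide (PySem.Int.mod x 2 = 0)) : Int),
       o + (vs.countP (fun x => decide (PySem.Int.mod x 2 ≠ 0)) : Int)) := by
  intro vs
  induction vs with
  | nil => intro n p z e o; simp
  | cons x xs ih =>
      intro n p z e o
      rw [List.foldl_cons, show stepA (n, p, z, e, o) x =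
        ((if x < 0 then n + 1 else n), (if x > 0 then p + 1 else p), (if x = 0 then z + 1 else z),
         (if PySem.Int.mod x 2 = 0 then e + 1 else e),
         (if PySem.Int.mod x 2 ≠ 0 then o + 1 else o)) from rfl, ih]
      simp only [List.countP_cons, List.count_cons, beq_iff_eq, decide_eq_true_eq]
      split_ifs <;> simp only [Prod.mk.injEq] <;> push_cast <;>
        refine ⟨by omega, by omega, by omega, by omega, by omega⟩

-- ===== VERDICT (by name: the statement is the Claim_ definition above) =====
theorem list_categorize_spec : Claim_equal_list_categorize := by
  intro values _
  unfold Spec_list_categorize list_categorize list_categorize_alt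
  rw [loop_counts]
  simp
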